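-- pv_equiv track=rewrite | github.com/yihaozhong/LPractice | ibm_ng.py | final_min_separated_difference
-- ===== SOURCE A (Python) =====
-- def final_min_separated_difference(numbers, separation):
--
--     sorted_numbers = sorted(enumerate(numbers), key=lambda x: x[1])
--
--     min_diff = float('inf')
--
--     for i in range(len(sorted_numbers)):
--         j = i + 1
--         while j < len(sorted_numbers) and sorted_numbers[j][0] - sorted_numbers[i][0] < separation:
--             j += 1
--
--         while j < len(sorted_numbers) and sorted_numbers[j][1] - sorted_numbers[i][1] < min_diff:
--             diff = abs(sorted_numbers[j][1] - sorted_numbers[i][1])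
--             min_diff = min(min_diff, diff)
--             j += 1
--
--     if min_diff == float('inf'):
--         return None
--
--     return min_diff
-- ===== SOURCE B (Python) =====
-- def final_min_separated_difference(numbers, separation):
--     n = len(numbers)
--     diffs = [numbers[q] - numbers[p]
--              for p in range(n) for q in range(n)
--              if p != q and q - p >= separation and numbers[p] <= numbers[q]]
--     return min(diffs, default=None)
-- ===== Notes on version B (the rewrite author's own statement) =====
-- stated objective: simpler
-- what changed: A sorts (index,value) pairs by value and, per sorted position, runs two stateful while-loops (skip to the first sufficiently-separated partner, then a pruned scan against the running minimum); B drops the sort and the while-loops entirely and returns the plain minimum of numbers[q]-numbers[p] over all distinct position pairs with q-p >= separation and numbers[p] <= numbers[q].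
import Mathlib
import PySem

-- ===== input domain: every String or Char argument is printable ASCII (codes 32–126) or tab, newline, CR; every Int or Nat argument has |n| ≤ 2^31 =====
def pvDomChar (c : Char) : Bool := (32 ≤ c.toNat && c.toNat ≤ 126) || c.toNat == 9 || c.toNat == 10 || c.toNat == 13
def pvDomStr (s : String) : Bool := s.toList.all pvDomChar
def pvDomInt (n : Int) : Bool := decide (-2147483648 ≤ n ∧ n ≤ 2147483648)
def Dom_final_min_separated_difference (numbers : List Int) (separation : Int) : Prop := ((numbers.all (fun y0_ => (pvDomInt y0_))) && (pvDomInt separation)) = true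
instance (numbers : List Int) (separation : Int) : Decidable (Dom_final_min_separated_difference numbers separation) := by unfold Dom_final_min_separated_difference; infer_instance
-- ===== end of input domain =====

-- B replaces A's sort + per-element skip-scan with early exits by a plain declarative minimum
-- over all distinct index-separated nondecreasing-value pairs (no sort, no while loops); objective: simpler.

-- ===== PORT A =====
-- default pair used with List.getD (accesses are always in range)
def pvPair0 : Int × Int := ((0 : Int), (0 : Int))

-- 'diff < min_diff' where min_diff may still be float('inf') (none)
def pvLtInf (d : Int) (md : Option Int) : Bool :=
  match md with
  | none => true
  | some m => decide (d < m)

-- 'min(min_diff, diff)' with min_diff possibly float('inf')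
def pvMinInf (md : Option Int) (d : Int) : Int :=
  match md with
  | none => d
  | some m => min m d

-- first while loop: advance j while separation not yet reached (fuel = sn.length - j)
def pvSkip (sn : List (Int × Int)) (i0 sep : Int) : Nat → Nat → Nat
  | 0, j => j
  | f + 1, j =>
      if j < sn.length ∧ (sn.getD j pvPair0).1 - i0 < sep then pvSkip sn i0 sep f (j + 1) else j

-- second while loop: scan while value difference beats min_diff (fuel = sn.length - j)
def pvScan (sn : List (Int × Int)) (v0 : Int) : Nat → Nat → Option Int → Option Int
  | 0, _, md => md
  | f + 1, j, md =>
      if j < sn.length ∧ pvLtInf ((sn.getD j pvPair0).2 - v0) md then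
        pvScan sn v0 f (j + 1) (some (pvMinInf md |(sn.getD j pvPair0).2 - v0|))
      else md

def final_min_separated_difference (numbers : List Int) (separation : Int) : Option Int :=
  let sn := PySem.List.sorted (PySem.List.enumerate numbers 0) (fun x => x.2)
  let n := sn.length
  let md := (List.range n).foldl
    (fun md i =>
      let j := pvSkip sn (sn.getD i pvPair0).1 separation (n - (i + 1)) (i + 1)
      pvScan sn (sn.getD i pvPair0).2 (n - j) j md)
    none
  -- 'if min_diff == float('inf'): return None; return min_diff' — none is float('inf')
  md

-- ===== PORT B =====
-- list comprehension of Source B: differences of all valid (p, q) pairs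
def pvDiffs (numbers : List Int) (separation : Int) : List Int :=
  (List.range numbers.length).flatMap (fun (p : Nat) =>
    ((List.range numbers.length).filter (fun (q : Nat) =>
        decide (p ≠ q ∧ (q : Int) - (p : Int) ≥ separation ∧
          numbers.getD p 0 ≤ numbers.getD q 0))).map
      (fun (q : Nat) => numbers.getD q 0 - numbers.getD p 0))

def final_min_separated_difference_alt (numbers : List Int) (separation : Int) : Option Int :=
  PySem.List.min? (pvDiffs numbers separation) (fun x => x)

-- ===== PRECONDITION & SPEC =====
def Spec_final_min_separated_difference (numbers : List Int) (separation : Int) (out : Option Int) : Prop := out = final_min_separated_difference_alt numbers separation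
instance (numbers : List Int) (separation : Int) (out : Option Int) : Decidable (Spec_final_min_separated_difference numbers separation out) := by unfold Spec_final_min_separated_difference; infer_instance

-- ===== CLAIM (what is proved, stated in full; the proofs are below) =====
def Claim_equal_final_min_separated_difference : Prop := ∀ (numbers : List Int) (separation : Int), Dom_final_min_separated_difference numbers separation → Spec_final_min_separated_difference numbers separation (final_min_separated_difference numbers separation)

-- ===== LEMMAS AND PROOFS =====

-- strict lexicographic order (value, then original index): the order of A's stable sort
def pvLex (a b : Int × Int) : Prop := a.2 < b.2 ∨ (a.2 = b.2 ∧ a.1 < b.1)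

def pvSn (numbers : List Int) : List (Int × Int) :=
  PySem.List.sorted (PySem.List.enumerate numbers 0) (fun x => x.2)

-- the j reached by A's first while loop, started at i+1
def pvJ (sn : List (Int × Int)) (sep : Int) (i : Nat) : Nat :=
  pvSkip sn (sn.getD i pvPair0).1 sep (sn.length - (i + 1)) (i + 1)

-- A's candidate difference contributed by sorted position i (none if no partner)
def pvCand (sn : List (Int × Int)) (sep : Int) (i : Nat) : Option Int :=
  if pvJ sn sep i < sn.length then
    some ((sn.getD (pvJ sn sep i) pvPair0).2 - (sn.getD i pvPair0).2)
  else none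

-- the abstract 'running minimum with none = infinity' step
def pvStep (cand : Nat → Option Int) (md : Option Int) (i : Nat) : Option Int :=
  match cand i with
  | none => md
  | some d => if pvLtInf d md then some d else md

-- ---- pvSkip characterization ----

theorem pvSkip_le (sn : List (Int × Int)) (i0 sep : Int) :
    ∀ f j, j ≤ pvSkip sn i0 sep f j := by
  intro f
  induction f with
  | zero => intro j; simp [pvSkip]
  | succ f ih =>
      intro j
      simp only [pvSkip]
      split
      · exact le_trans (Nat.le_succ j) (ih (j + 1))
      · exact le_refl j

theorem pvSkip_le_len (sn : List (Int × Int)) (i0 sep : Int) :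
    ∀ f j, j ≤ sn.length → pvSkip sn i0 sep f j ≤ sn.length := by
  intro f
  induction f with
  | zero => intro j hj; simpa [pvSkip] using hj
  | succ f ih =>
      intro j hj
      simp only [pvSkip]
      split
      · rename_i h; exact ih (j + 1) h.1
      · exact hj

theorem pvSkip_lt_of_lt (sn : List (Int × Int)) (i0 sep : Int) :
    ∀ f j k, j ≤ k → k < pvSkip sn i0 sep f j → (sn.getD k pvPair0).1 - i0 < sep := by
  intro f
  induction f with
  | zero => intro j k hjk hk; simp [pvSkip] at hk; omega
  | succ f ih =>
      intro j k hjk hk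
      simp only [pvSkip] at hk
      split at hk
      · rename_i h
        rcases Nat.eq_or_lt_of_le hjk with rfl | hlt
        · exact h.2
        · exact ih (j + 1) k hlt hk
      · omega

theorem pvSkip_stop (sn : List (Int × Int)) (i0 sep : Int) :
    ∀ f j, sn.length ≤ f + j → pvSkip sn i0 sep f j < sn.length →
      ¬((sn.getD (pvSkip sn i0 sep f j) pvPair0).1 - i0 < sep) := by
  intro f
  induction f with
  | zero => intro j h hr; simp only [pvSkip] at hr ⊢; omega
  | succ f ih =>
      intro j h
      by_cases hc : j < sn.length ∧ (sn.getD j pvPair0).1 - i0 < sep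
      · simp only [pvSkip, if_pos hc]
        exact ih (j + 1) (by omega)
      · simp only [pvSkip, if_neg hc]
        intro hr hlt
        exact hc ⟨hr, hlt⟩

-- ---- pvScan characterization ----

theorem pvScan_noop (sn : List (Int × Int)) (v0 : Int) :
    ∀ f j m, (∀ k, j ≤ k → k < sn.length → ¬((sn.getD k pvPair0).2 - v0 < m)) →
      pvScan sn v0 f j (some m) = some m := by
  intro f
  induction f with
  | zero => intro j m _; simp [pvScan]
  | succ f ih =>
      intro j m h
      simp only [pvScan]
      split
      · rename_i hc
        exact absurd (by simpa [pvLtInf] using hc.2) (h j (le_refl j) hc.1)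
      · rfl

theorem pvScan_eq (sn : List (Int × Int)) (v0 : Int) (f j : Nat) (md : Option Int)
    (hf : sn.length ≤ f + j)
    (hmono : ∀ k, j ≤ k → k < sn.length →
      (sn.getD j pvPair0).2 ≤ (sn.getD k pvPair0).2)
    (hv0 : j < sn.length → v0 ≤ (sn.getD j pvPair0).2) :
    pvScan sn v0 f j md =
      if j < sn.length ∧ pvLtInf ((sn.getD j pvPair0).2 - v0) md then
        some ((sn.getD j pvPair0).2 - v0)
      else md := by
  cases f with
  | zero =>
      have hn : ¬ j < sn.length := by omega
      have : ¬ (j < sn.length ∧ pvLtInf ((sn.getD j pvPair0).2 - v0) md) := fun h => hn h.1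
      simp only [pvScan, if_neg this]
  | succ f =>
      simp only [pvScan]
      split
      · rename_i hc
        have habs : |(sn.getD j pvPair0).2 - v0| = (sn.getD j pvPair0).2 - v0 := by
          have := hv0 hc.1; exact abs_of_nonneg (by omega)
        have hmin : pvMinInf md ((sn.getD j pvPair0).2 - v0) = (sn.getD j pvPair0).2 - v0 := by
          have hlt := hc.2
          cases md with
          | none => rfl
          | some m =>
              simp only [pvLtInf, decide_eq_true_eq] at hlt
              simp only [pvMinInf]
              omega
        have hnoop : ∀ k, j + 1 ≤ k → k < sn.length →
            ¬((sn.getD k pvPair0).2 - v0 < (sn.getD j pvPair0).2 - v0) := by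
          intro k hk hkn
          have := hmono k (by omega) hkn
          omega
        rw [habs, hmin, pvScan_noop sn v0 f (j + 1) _ hnoop]
      · rfl

-- ---- abstract running-minimum fold ----

theorem pvStep_none_iff (cand : Nat → Option Int) (md : Option Int) (i : Nat) :
    pvStep cand md i = none ↔ md = none ∧ cand i = none := by
  unfold pvStep
  cases h : cand i with
  | none => simp
  | some d =>
      cases md with
      | none => simp [pvLtInf]
      | some m => by_cases hd : d < m <;> simp [pvLtInf, hd]

theorem pvStep_eq_some (cand : Nat → Option Int) (md : Option Int) (i : Nat) (d : Int)
    (hc : cand i = some d) :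
    pvStep cand md i = if pvLtInf d md then some d else md := by
  simp only [pvStep, hc]

theorem pvStep_eq_none (cand : Nat → Option Int) (md : Option Int) (i : Nat)
    (hc : cand i = none) : pvStep cand md i = md := by
  simp only [pvStep, hc]

theorem pvStep_cases (cand : Nat → Option Int) (md : Option Int) (i : Nat) (m : Int)
    (h : pvStep cand md i = some m) :
    (md = some m ∨ cand i = some m) ∧
      (∀ m0, md = some m0 → m ≤ m0) ∧ (∀ d, cand i = some d → m ≤ d) := by
  cases hc : cand i with
  | none =>
      simp only [pvStep, hc] at h
      refine ⟨Or.inl h, fun m0 hm0 => ?_, fun d hd => ?_⟩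
      · rw [h] at hm0; injection hm0 with h'; omega
      · cases hd
  | some d =>
      cases md with
      | none =>
          simp only [pvStep, hc, pvLtInf, if_pos] at h
          injection h with h1
          refine ⟨Or.inr (by rw [h1]), fun m0 hm0 => by simp at hm0, fun d' hd' => ?_⟩
          injection hd' with h2; omega
      | some m0 =>
          by_cases hlt : d < m0
          · simp only [pvStep, hc, pvLtInf, hlt, decide_true, if_pos] at h
            injection h with h1
            refine ⟨Or.inr (by rw [h1]), fun m1 hm1 => ?_, fun d' hd' => ?_⟩
            · injection hm1 with h2; omega
            · injection hd' with h2; omega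
          · simp only [pvStep, hc, pvLtInf, hlt, decide_false, Bool.false_eq_true,
              if_false] at h
            injection h with h1
            refine ⟨Or.inl (by rw [h1]), fun m1 hm1 => ?_, fun d' hd' => ?_⟩
            · injection hm1 with h2; omega
            · injection hd' with h2; omega

theorem pvFold_none (cand : Nat → Option Int) :
    ∀ (l : List Nat) (md : Option Int),
      l.foldl (pvStep cand) md = none ↔ md = none ∧ ∀ i ∈ l, cand i = none := by
  intro l
  induction l with
  | nil => intro md; simp
  | cons a l ih =>
      intro md
      simp only [List.foldl_cons, ih, pvStep_none_iff, List.mem_cons]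
      constructor
      · rintro ⟨⟨h1, h2⟩, h3⟩
        refine ⟨h1, ?_⟩
        intro k hk
        rcases hk with rfl | hk
        · exact h2
        · exact h3 k hk
      · rintro ⟨h1, h2⟩
        exact ⟨⟨h1, h2 a (Or.inl rfl)⟩, fun k hk => h2 k (Or.inr hk)⟩

theorem pvFold_some (cand : Nat → Option Int) :
    ∀ (l : List Nat) (md : Option Int) (m : Int),
      l.foldl (pvStep cand) md = some m →
        (md = some m ∨ ∃ i ∈ l, cand i = some m) ∧
          (∀ m0, md = some m0 → m ≤ m0) ∧
          (∀ i ∈ l, ∀ d, cand i = some d → m ≤ d) := by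
  intro l
  induction l with
  | nil =>
      intro md m h
      simp only [List.foldl_nil] at h
      subst h
      refine ⟨Or.inl rfl, fun m0 hm0 => ?_, by simp⟩
      injection hm0 with h'; omega
  | cons a l ih =>
      intro md m h
      simp only [List.foldl_cons] at h
      obtain ⟨hprov, hmd', hcands⟩ := ih (pvStep cand md a) m h
      constructor
      · rcases hprov with h1 | h1
        · rcases (pvStep_cases cand md a m h1).1 with h2 | h2
          · exact Or.inl h2
          · exact Or.inr ⟨a, List.mem_cons_self .., h2⟩
        · obtain ⟨k, hk, hck⟩ := h1
          exact Or.inr ⟨k, List.mem_cons_of_mem a hk, hck⟩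
      constructor
      · intro m0 hm0
        cases hstep : pvStep cand md a with
        | none =>
            rw [pvStep_none_iff] at hstep
            rw [hstep.1] at hm0
            cases hm0
        | some m1 =>
            have h1 := (pvStep_cases cand md a m1 hstep).2.1 m0 hm0
            have h2 := hmd' m1 hstep
            omega
      · intro k hk d hd
        rcases List.mem_cons.mp hk with rfl | hk'
        · cases hstep : pvStep cand md k with
          | none =>
              rw [pvStep_none_iff] at hstep
              rw [hstep.2] at hd
              cases hd
          | some m1 =>
              have h1 := (pvStep_cases cand md k m1 hstep).2.2 d hd
              have h2 := hmd' m1 hstep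
              omega
        · exact hcands k hk' d hd

-- ---- A's fold is the abstract fold over pvCand ----

theorem pvA_eq_fold (numbers : List Int) (separation : Int) :
    final_min_separated_difference numbers separation =
      (List.range (pvSn numbers).length).foldl
        (pvStep (pvCand (pvSn numbers) separation)) none := by
  show (List.range (pvSn numbers).length).foldl
      (fun md i =>
        pvScan (pvSn numbers) ((pvSn numbers).getD i pvPair0).2
          ((pvSn numbers).length -
            pvSkip (pvSn numbers) ((pvSn numbers).getD i pvPair0).1 separation
              ((pvSn numbers).length - (i + 1)) (i + 1))
          (pvSkip (pvSn numbers) ((pvSn numbers).getD i pvPair0).1 separation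
            ((pvSn numbers).length - (i + 1)) (i + 1)) md)
      none =
    (List.range (pvSn numbers).length).foldl
      (pvStep (pvCand (pvSn numbers) separation)) none
  refine PySem.List.foldl_congr_mem _ _ _ _ ?_
  intro md i hi
  have hin : i < (pvSn numbers).length := List.mem_range.mp hi
  set sn := pvSn numbers with hsn
  have hJ1 : i + 1 ≤ pvJ sn separation i := pvSkip_le sn _ _ _ _
  have hJn : pvJ sn separation i ≤ sn.length := pvSkip_le_len sn _ _ _ _ (by omega)
  have hmono : ∀ p q, p ≤ q → q < sn.length →
      (sn.getD p pvPair0).2 ≤ (sn.getD q pvPair0).2 := by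
    intro p q hpq hq
    have hp : p < sn.length := by omega
    rw [List.getD_eq_getElem sn pvPair0 hp, List.getD_eq_getElem sn pvPair0 hq]
    exact PySem.List.key_sorted_getElem_mono (PySem.List.enumerate numbers 0)
      (fun x => x.2) hpq (by simpa [hsn, pvSn] using hq)
  have hrw := pvScan_eq sn ((sn.getD i pvPair0).2)
    (sn.length - pvJ sn separation i) (pvJ sn separation i) md
    (by omega)
    (fun k hk hkn => hmono (pvJ sn separation i) k hk hkn)
    (fun hJlt => hmono i (pvJ sn separation i) (by omega) hJlt)
  show pvScan sn ((sn.getD i pvPair0).2) (sn.length - pvJ sn separation i)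
      (pvJ sn separation i) md = pvStep (pvCand sn separation) md i
  rw [hrw]
  by_cases hcase : pvJ sn separation i < sn.length
  · rw [pvStep_eq_some (pvCand sn separation) md i
      ((sn.getD (pvJ sn separation i) pvPair0).2 - (sn.getD i pvPair0).2)
      (by unfold pvCand; rw [if_pos hcase])]
    by_cases hb : pvLtInf ((sn.getD (pvJ sn separation i) pvPair0).2 - (sn.getD i pvPair0).2) md
    · rw [if_pos ⟨hcase, hb⟩, if_pos hb]
    · rw [if_neg (fun h => hb h.2), if_neg hb]
  · rw [pvStep_eq_none (pvCand sn separation) md i (by unfold pvCand; rw [if_neg hcase]),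
      if_neg (fun h => hcase h.1)]

-- ---- the stable sort is lexicographically pairwise ----

theorem pvLex_asymm (a b : Int × Int) : pvLex a b → pvLex b a → False := by
  unfold pvLex; omega

theorem pvInsert_pairwise (x : Int × Int) :
    ∀ acc : List (Int × Int), acc.Pairwise pvLex → (∀ a ∈ acc, a.1 < x.1) →
      (PySem.List.insertBy (fun a b => decide (a.2 < b.2)) x acc).Pairwise pvLex := by
  intro acc
  induction acc with
  | nil => intro _ _; simp [PySem.List.insertBy]
  | cons y ys ih =>
      intro hp hx
      rw [List.pairwise_cons] at hp
      simp only [PySem.List.insertBy]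
      split
      · rename_i hlt
        simp only [decide_eq_true_eq] at hlt
        refine List.pairwise_cons.mpr ⟨?_, List.pairwise_cons.mpr ⟨hp.1, hp.2⟩⟩
        intro z hz
        rcases List.mem_cons.mp hz with rfl | hz'
        · exact Or.inl hlt
        · have := hp.1 z hz'
          unfold pvLex at this ⊢
          omega
      · rename_i hge
        simp only [decide_eq_true_eq] at hge
        refine List.pairwise_cons.mpr ⟨?_, ih hp.2 (fun a ha => hx a (List.mem_cons_of_mem y ha))⟩
        intro z hz
        rcases (PySem.List.mem_insertBy _ _ _ _).mp hz with rfl | hz'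
        · have hyx := hx y (List.mem_cons_self ..)
          unfold pvLex
          omega
        · exact hp.1 z hz'

theorem pvFoldInsert_pairwise :
    ∀ (l acc : List (Int × Int)), acc.Pairwise pvLex →
      l.Pairwise (fun a b => a.1 < b.1) → (∀ a ∈ acc, ∀ b ∈ l, a.1 < b.1) →
      (l.foldl (fun acc x => PySem.List.insertBy (fun a b => decide (a.2 < b.2)) x acc) acc).Pairwise pvLex := by
  intro l
  induction l with
  | nil => intro acc h _ _; simpa using h
  | cons x l ih =>
      intro acc hacc hl hcross
      rw [List.pairwise_cons] at hl
      simp only [List.foldl_cons]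
      refine ih _ (pvInsert_pairwise x acc hacc (fun a ha => hcross a ha x (List.mem_cons_self ..))) hl.2 ?_
      intro a ha b hb
      rcases (PySem.List.mem_insertBy _ _ _ _).mp ha with rfl | ha'
      · exact hl.1 b hb
      · exact hcross a ha' b (List.mem_cons_of_mem x hb)

theorem pvSn_pairwise (numbers : List Int) : (pvSn numbers).Pairwise pvLex := by
  unfold pvSn
  rw [PySem.List.sorted_eq_foldl_insertBy]
  exact pvFoldInsert_pairwise (PySem.List.enumerate numbers 0) [] (by simp)
    (PySem.List.pairwise_lt_enumerate numbers 0) (by simp)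

-- ---- membership bridge between sorted positions and B's pair comprehension ----

theorem pvMem_diffs (numbers : List Int) (separation : Int) (x : Int) :
    x ∈ pvDiffs numbers separation ↔
      ∃ p q : Nat, p < numbers.length ∧ q < numbers.length ∧
        p ≠ q ∧ (q : Int) - (p : Int) ≥ separation ∧
        numbers.getD p 0 ≤ numbers.getD q 0 ∧
        x = numbers.getD q 0 - numbers.getD p 0 := by
  unfold pvDiffs
  simp only [List.mem_flatMap, List.mem_map, List.mem_filter, List.mem_range,
    decide_eq_true_eq]
  constructor
  · rintro ⟨p, hp, q, ⟨⟨hq, hc1, hc2, hc3⟩, rfl⟩⟩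
    exact ⟨p, q, hp, hq, hc1, hc2, hc3, rfl⟩
  · rintro ⟨p, q, hp, hq, h1, h2, h3, rfl⟩
    exact ⟨p, hp, q, ⟨⟨hq, h1, h2, h3⟩, rfl⟩⟩

-- B's membership condition reduced to A's stable-sort order: the witnessing pair can be
-- chosen with the pvLex (value, then index) orientation
theorem pvMem_diffs_lex (numbers : List Int) (separation : Int) (x : Int)
    (hx : x ∈ pvDiffs numbers separation) :
    ∃ p q : Nat, p < numbers.length ∧ q < numbers.length ∧
      (q : Int) - (p : Int) ≥ separation ∧
      (numbers.getD p 0 < numbers.getD q 0 ∨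
        (numbers.getD p 0 = numbers.getD q 0 ∧ p < q)) ∧
      x = numbers.getD q 0 - numbers.getD p 0 := by
  rw [pvMem_diffs] at hx
  obtain ⟨p, q, hp, hq, hne, hsep, hle, rfl⟩ := hx
  by_cases heq : numbers.getD p 0 = numbers.getD q 0
  · by_cases hpq : p < q
    · exact ⟨p, q, hp, hq, hsep, Or.inr ⟨heq, hpq⟩, rfl⟩
    · -- q < p, equal values: use the symmetric pair (q, p); its separation holds since
      -- q - p ≥ separation and q - p ≤ -1 force separation ≤ -1 < p - q
      have hqp : q < p := by omega
      refine ⟨q, p, hq, hp, by omega, Or.inr ⟨heq.symm, hqp⟩, by omega⟩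
  · exact ⟨p, q, hp, hq, hsep, Or.inl (lt_of_le_of_ne hle heq), rfl⟩

-- elements of pvSn are enumerate pairs
theorem pvSn_elem (numbers : List Int) (i : Nat) (hi : i < (pvSn numbers).length) :
    ∃ p : Nat, ∃ hp : p < numbers.length,
      (pvSn numbers)[i] = ((p : Int), numbers[p]) := by
  have hmem : (pvSn numbers)[i] ∈ PySem.List.enumerate numbers 0 :=
    (PySem.List.sorted_perm (PySem.List.enumerate numbers 0) (fun x => x.2) false).mem_iff.mp
      (List.getElem_mem hi)
  rw [PySem.List.mem_enumerate_iff] at hmem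
  obtain ⟨k, hk, hkeq⟩ := hmem
  exact ⟨k, hk, by simpa using hkeq⟩

-- positions of two lex-ordered members
theorem pvPos_of_lex (numbers : List Int) (a b : Int × Int)
    (ha : a ∈ pvSn numbers) (hb : b ∈ pvSn numbers) (hab : pvLex a b) :
    ∃ (i j : Nat) (hi : i < (pvSn numbers).length) (hj : j < (pvSn numbers).length),
      i < j ∧ (pvSn numbers)[i] = a ∧ (pvSn numbers)[j] = b := by
  obtain ⟨i, hi, hia⟩ := List.mem_iff_getElem.mp ha
  obtain ⟨j, hj, hjb⟩ := List.mem_iff_getElem.mp hb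
  have hpw := List.pairwise_iff_getElem.mp (pvSn_pairwise numbers)
  rcases lt_trichotomy i j with h | h | h
  · exact ⟨i, j, hi, hj, h, hia, hjb⟩
  · subst h
    rw [hia] at hjb
    subst hjb
    exact absurd hab (fun h => pvLex_asymm a a h h)
  · have := hpw j i hj hi h
    rw [hia, hjb] at this
    exact absurd hab (fun h' => pvLex_asymm a b h' this)

-- E1: every candidate of A is in B's diff list
theorem pvCand_mem (numbers : List Int) (separation : Int) (i : Nat)
    (hi : i < (pvSn numbers).length) (d : Int)
    (hc : pvCand (pvSn numbers) separation i = some d) :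
    d ∈ pvDiffs numbers separation := by
  set sn := pvSn numbers with hsn
  unfold pvCand at hc
  by_cases hJn : pvJ sn separation i < sn.length
  · rw [if_pos hJn] at hc
    injection hc with hc
    have hJ1 : i + 1 ≤ pvJ sn separation i := pvSkip_le sn _ _ _ _
    have hlex : pvLex sn[i] sn[pvJ sn separation i] :=
      List.pairwise_iff_getElem.mp (pvSn_pairwise numbers) i _ hi hJn (by omega)
    obtain ⟨p, hp, hpe⟩ := pvSn_elem numbers i hi
    obtain ⟨q, hq, hqe⟩ := pvSn_elem numbers _ hJn
    have hstop : ¬((sn.getD (pvJ sn separation i) pvPair0).1 - (sn.getD i pvPair0).1 < separation) :=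
      pvSkip_stop sn (sn.getD i pvPair0).1 separation (sn.length - (i + 1)) (i + 1)
        (by omega) hJn
    have hgi : sn.getD i pvPair0 = ((p : Int), numbers[p]) := by
      rw [List.getD_eq_getElem sn pvPair0 hi]; exact hpe
    have hgJ : sn.getD (pvJ sn separation i) pvPair0 = ((q : Int), numbers[q]) := by
      rw [List.getD_eq_getElem sn pvPair0 hJn]; exact hqe
    rw [hgi, hgJ] at hc hstop
    rw [hpe, hqe] at hlex
    rw [pvMem_diffs]
    unfold pvLex at hlex
    simp only at hlex hstop hc
    refine ⟨p, q, hp, hq, ?_, by omega, ?_, ?_⟩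
    · -- p ≠ q: either the values differ or the indices do
      rintro rfl
      rcases hlex with h | h
      · exact lt_irrefl _ h
      · exact lt_irrefl _ h.2
    · rw [List.getD_eq_getElem numbers 0 hp, List.getD_eq_getElem numbers 0 hq]
      rcases hlex with h | h
      · omega
      · omega
    · rw [List.getD_eq_getElem numbers 0 hp, List.getD_eq_getElem numbers 0 hq]
      omega
  · rw [if_neg hJn] at hc; cases hc

-- E2: every element of B's diff list is dominated by some candidate of A
theorem pvDiffs_dominated (numbers : List Int) (separation : Int) (x : Int)
    (hx : x ∈ pvDiffs numbers separation) :
    ∃ i : Nat, i < (pvSn numbers).length ∧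
      ∃ d : Int, pvCand (pvSn numbers) separation i = some d ∧ d ≤ x := by
  set sn := pvSn numbers with hsn
  obtain ⟨p, q, hp, hq, hsep, hcond, rfl⟩ := pvMem_diffs_lex numbers separation x hx
  have hmema : ((p : Int), numbers[p]) ∈ sn := by
    rw [hsn]
    unfold pvSn
    rw [(PySem.List.sorted_perm _ _ _).mem_iff, PySem.List.mem_enumerate_iff]
    exact ⟨p, hp, by simp⟩
  have hmemb : ((q : Int), numbers[q]) ∈ sn := by
    rw [hsn]
    unfold pvSn
    rw [(PySem.List.sorted_perm _ _ _).mem_iff, PySem.List.mem_enumerate_iff]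
    exact ⟨q, hq, by simp⟩
  have hlex : pvLex ((p : Int), numbers[p]) ((q : Int), numbers[q]) := by
    unfold pvLex
    simp only
    rw [List.getD_eq_getElem numbers 0 hp, List.getD_eq_getElem numbers 0 hq] at hcond
    rcases hcond with h | h
    · exact Or.inl h
    · exact Or.inr ⟨h.1, by exact_mod_cast h.2⟩
  obtain ⟨i, j, hi, hj, hij, hie, hje⟩ := pvPos_of_lex numbers _ _ hmema hmemb hlex
  have hi' : i < sn.length := hi
  have hj' : j < sn.length := hj
  have hgi : sn.getD i pvPair0 = ((p : Int), numbers[p]) := by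
    rw [List.getD_eq_getElem sn pvPair0 hi']; exact hie
  have hgj : sn.getD j pvPair0 = ((q : Int), numbers[q]) := by
    rw [List.getD_eq_getElem sn pvPair0 hj']; exact hje
  have hJ1 : i + 1 ≤ pvJ sn separation i := pvSkip_le sn _ _ _ _
  have hJj : pvJ sn separation i ≤ j := by
    by_contra hcon
    have hlt := pvSkip_lt_of_lt sn (sn.getD i pvPair0).1 separation
      (sn.length - (i + 1)) (i + 1) j (by omega) (show j < pvJ sn separation i by omega)
    rw [hgi, hgj] at hlt
    simp only at hlt
    omega
  have hJn : pvJ sn separation i < sn.length := by omega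
  refine ⟨i, hi, (sn.getD (pvJ sn separation i) pvPair0).2 - (sn.getD i pvPair0).2, ?_, ?_⟩
  · unfold pvCand
    rw [if_pos hJn]
  · have hmono : (sn.getD (pvJ sn separation i) pvPair0).2 ≤ (sn.getD j pvPair0).2 := by
      rw [List.getD_eq_getElem sn pvPair0 hJn, List.getD_eq_getElem sn pvPair0 hj']
      exact PySem.List.key_sorted_getElem_mono (PySem.List.enumerate numbers 0)
        (fun x => x.2) hJj (by simpa [hsn, pvSn] using hj')
    rw [hgj] at hmono
    rw [hgi]
    rw [List.getD_eq_getElem numbers 0 hp, List.getD_eq_getElem numbers 0 hq]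
    simp only at hmono ⊢
    omega

-- ===== VERDICT (by name: the statement is the Claim_ definition above) =====
theorem final_min_separated_difference_spec : Claim_equal_final_min_separated_difference := by
  unfold Claim_equal_final_min_separated_difference
  intro numbers separation _
  unfold Spec_final_min_separated_difference final_min_separated_difference_alt
  rw [pvA_eq_fold]
  set sn := pvSn numbers with hsn
  set cand := pvCand sn separation with hcand
  cases hA : (List.range sn.length).foldl (pvStep cand) none with
  | none =>
      rw [pvFold_none] at hA
      have hempty : pvDiffs numbers separation = [] := by
        rw [List.eq_nil_iff_forall_not_mem]
        intro x hx
        obtain ⟨i, hi, d, hc, _⟩ := pvDiffs_dominated numbers separation x hx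
        have hnone := hA.2 i (List.mem_range.mpr hi)
        rw [hcand] at hnone
        rw [hnone] at hc
        cases hc
      rw [hempty]
      rfl
  | some m =>
      obtain ⟨hprov, _, hlb⟩ := pvFold_some cand (List.range sn.length) none m hA
      rcases hprov with h | ⟨i, hi, hci⟩
      · cases h
      · have hmem : m ∈ pvDiffs numbers separation :=
          pvCand_mem numbers separation i (List.mem_range.mp hi) m hci
        cases hB : PySem.List.min? (pvDiffs numbers separation) (fun x => x) with
        | none =>
            rw [PySem.List.min?_eq_none_iff] at hB
            rw [hB] at hmem
            cases hmem
        | some b =>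
            have hble : b ≤ m := PySem.List.min?_isMin hB m hmem
            have hbmem : b ∈ pvDiffs numbers separation := PySem.List.min?_mem hB
            obtain ⟨k, hk, d, hcd, hdb⟩ := pvDiffs_dominated numbers separation b hbmem
            have hmd : m ≤ d := hlb k (List.mem_range.mpr hk) d hcd
            have heq : m = b := by omega
            rw [heq]
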